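-- pv_equiv track=rewrite | github.com/Levatius/advent-of-code-2024 | src/day_06.py | parse
-- ===== SOURCE A (Python) =====
-- def parse(lines):
--     position = None
--     obstructions = set()
--     for j, line in enumerate(lines):
--         for i, item in enumerate(line):
--             match item:
--                 case "#":
--                     obstructions.add((j, i))
--                 case "^":
--                     position = (j, i)
--     bounds = (len(lines), len(lines[0]))
--     return position, obstructions, bounds
-- ===== SOURCE B (Python) =====
-- def parse(lines):
--     def positions(line, ch):
--         # index-jumping scan: str.find with a moving start offset, instead of
--         # visiting every character
--         out = []
--         i = line.find(ch)
--         while i != -1: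
--             out.append(i)
--             i = line.find(ch, i + 1)
--         return out
--
--     obstructions = set()
--     position = None
--     for j, line in enumerate(lines):
--         for i in positions(line, "#"):
--             obstructions.add((j, i))
--         carets = positions(line, "^")
--         if carets:
--             position = (j, carets[-1])
--     bounds = (len(lines), len(lines[0]))
--     return position, obstructions, bounds
-- ===== Notes on version B (the rewrite author's own statement) =====
-- stated objective: alternative
-- what changed: A's per-character match/enumerate scan is replaced by an index-jumping search: a positions() helper that walks each line with str.find(ch, start+1) to hop directly between occurrences, obstructions filled from the '#' hit lists and the position taken as the last element of the last non-empty '^' hit list.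
import Mathlib
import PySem

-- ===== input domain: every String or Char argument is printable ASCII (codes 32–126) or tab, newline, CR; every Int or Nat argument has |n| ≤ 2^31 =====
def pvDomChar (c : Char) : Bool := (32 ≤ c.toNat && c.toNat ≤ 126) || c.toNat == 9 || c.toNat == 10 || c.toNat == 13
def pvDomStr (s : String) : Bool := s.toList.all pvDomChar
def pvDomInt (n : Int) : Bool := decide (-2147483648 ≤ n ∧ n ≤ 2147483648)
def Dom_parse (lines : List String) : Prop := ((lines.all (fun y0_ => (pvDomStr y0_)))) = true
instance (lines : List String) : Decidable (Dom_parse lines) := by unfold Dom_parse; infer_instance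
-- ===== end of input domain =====

-- B replaces A's per-character match scan by an index-jumping str.find(ch, start) search
-- per line; same asymptotic cost, a different search mechanism.

-- ===== PORT A =====
def parse (lines : List String) : (Option (Int × Int)) × (List (Int × Int)) × (Int × Int) :=
  let st := (PySem.List.enumerate lines 0).foldl
    (fun st jl =>
      (PySem.List.enumerate jl.2.toList 0).foldl
        (fun st ic =>
          if ic.2 = '#' then (st.1, PySem.Set.add st.2 (jl.1, ic.1))
          else if ic.2 = '^' then (some (jl.1, ic.1), st.2)
          else st) st)
    ((none : Option (Int × Int)), (PySem.Set.empty : PySem.Set (Int × Int)))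
  -- len(lines[0]) raises IndexError on lines = []; Pre_parse excludes it, so pyGetD is exact here
  (st.1, st.2, ((lines.length : Int), PySem.Str.len (PySem.List.pyGetD lines 0 "")))

-- ===== PORT B =====
-- the 'while i != -1' loop of positions(); the fuel argument only makes it total
-- (each hit index strictly increases, so cs.length + 1 steps always suffice)
def posGo (cs : List Char) (ch : List Char) : Nat → Int → List Int → List Int
  | 0, _, acc => acc
  | f + 1, i, acc =>
      if i = -1 then acc
      else posGo cs ch f (PySem.Chars.findFrom cs ch (i + 1) none) (acc ++ [i])

def positions (cs : List Char) (ch : List Char) : List Int :=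
  posGo cs ch (cs.length + 1) (PySem.Chars.find cs ch) []

def parse_alt (lines : List String) : (Option (Int × Int)) × (List (Int × Int)) × (Int × Int) :=
  let st := (PySem.List.enumerate lines 0).foldl
    (fun st jl =>
      let cs := jl.2.toList
      let obs := (positions cs ['#']).foldl (fun s i => PySem.Set.add s (jl.1, i)) st.2
      let carets := positions cs ['^']
      -- 'if carets: position = (j, carets[-1])'
      let pos := match carets.getLast? with
        | some i => some (jl.1, i)
        | none => st.1
      (pos, obs))
    ((none : Option (Int × Int)), (PySem.Set.empty : PySem.Set (Int × Int)))
  (st.1, st.2, ((lines.length : Int), PySem.Str.len (PySem.List.pyGetD lines 0 "")))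

-- ===== PRECONDITION & SPEC =====
-- Pre_ excludes only the empty list, on which Python A raises IndexError at len(lines[0])
def Pre_parse (lines : List String) : Prop := lines ≠ []
instance (lines : List String) : Decidable (Pre_parse lines) := by unfold Pre_parse; infer_instance
def pvWitness_parse : List String := ["#.", ".^"]

def Spec_parse (lines : List String) (out : (Option (Int × Int)) × (List (Int × Int)) × (Int × Int)) : Prop := out = parse_alt lines
instance (lines : List String) (out : (Option (Int × Int)) × (List (Int × Int)) × (Int × Int)) : Decidable (Spec_parse lines out) := by unfold Spec_parse; infer_instance

-- ===== CLAIM (what is proved, stated in full; the proofs are below) =====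
def Claim_equal_parse : Prop := ∀ (lines : List String), Dom_parse lines → Pre_parse lines → Spec_parse lines (parse lines)

-- ===== LEMMAS AND PROOFS =====

-- spec helper: the indices (from n upward) of character c in a list
def occAux (c : Char) : List Char → Int → List Int
  | [], _ => []
  | x :: t, n => if x = c then n :: occAux c t (n + 1) else occAux c t (n + 1)

lemma occAux_of_not_mem (c : Char) (l : List Char) (n : Int) (h : c ∉ l) :
    occAux c l n = [] := by
  induction l generalizing n with
  | nil => rfl
  | cons x t ih =>
      simp only [List.mem_cons, not_or] at h
      simp [occAux, Ne.symm h.1, ih _ h.2]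

lemma singleton_prefix_iff (c : Char) (l : List Char) : [c] <+: l ↔ l.head? = some c := by
  cases l <;> simp [List.cons_prefix_cons, eq_comm]

lemma singleton_infix_iff (c : Char) (l : List Char) : [c] <:+: l ↔ c ∈ l := by
  constructor
  · rintro ⟨s, t, rfl⟩; simp
  · intro h
    obtain ⟨s, t, rfl⟩ := List.append_of_mem h
    exact ⟨s, t, by simp⟩

lemma occAux_drop_split (cs : List Char) (c : Char) :
    ∀ (d k m : Nat), m - k = d → k ≤ m → m < cs.length →
    (∀ i : Nat, k ≤ i → i < m → cs[i]? ≠ some c) → cs[m]? = some c →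
    occAux c (cs.drop k) k = (m : Int) :: occAux c (cs.drop (m + 1)) (m + 1) := by
  intro d
  induction d with
  | zero =>
      intro k m hd hk hm _ hc
      have hkm : k = m := by omega
      subst hkm
      rw [List.drop_eq_getElem_cons hm]
      have : cs[k] = c := by
        have := hc; rw [List.getElem?_eq_getElem hm] at this; exact Option.some_injective _ this
      simp [occAux, this]
  | succ d ih =>
      intro k m hd hk hm hmin hc
      have hklt : k < m := by omega
      have hkcs : k < cs.length := by omega
      rw [List.drop_eq_getElem_cons hkcs]
      have hne : cs[k] ≠ c := by
        intro h
        exact hmin k le_rfl hklt (by rw [List.getElem?_eq_getElem hkcs, h])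
      rw [occAux, if_neg hne]
      exact ih (k + 1) m (by omega) (by omega) hm
        (fun i h1 h2 => hmin i (by omega) h2) hc

lemma posGo_spec (cs : List Char) (c : Char) :
    ∀ (fuel k : Nat) (acc : List Int), k ≤ cs.length → cs.length + 1 - k ≤ fuel →
    posGo cs [c] fuel (PySem.Chars.findFrom cs [c] (k : Int) none) acc
      = acc ++ occAux c (cs.drop k) k := by
  intro fuel
  induction fuel with
  | zero => intro k acc hk hf; omega
  | succ f ih =>
      intro k acc hk hf
      by_cases h : PySem.Chars.findFrom cs [c] (k : Int) none = -1
      · rw [h]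
        have hnin : ¬ [c] <:+: cs.drop k :=
          (PySem.Chars.findFrom_natCast_eq_neg_one_iff cs [c] k hk).mp h
        rw [singleton_infix_iff] at hnin
        simp [posGo, occAux_of_not_mem c _ _ hnin]
      · obtain ⟨hge, hpre, hmin⟩ := PySem.Chars.findFrom_natCast_spec cs [c] k hk h
        set m : Int := PySem.Chars.findFrom cs [c] (k : Int) none with hm
        have hm0 : 0 ≤ m := le_trans (by exact_mod_cast Int.natCast_nonneg k) hge
        have hcm : cs[m.toNat]? = some c := by
          rw [singleton_prefix_iff, List.head?_drop] at hpre; exact hpre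
        have hmlt : m.toNat < cs.length := by
          by_contra hcon
          rw [List.getElem?_eq_none (by omega : cs.length ≤ m.toNat)] at hcm
          exact Option.some_ne_none c hcm.symm
        have hkm : k ≤ m.toNat := by omega
        rw [posGo, if_neg h]
        have hstep : m + 1 = ((m.toNat + 1 : Nat) : Int) := by omega
        rw [hstep, ih (m.toNat + 1) (acc ++ [m]) (by omega) (by omega)]
        have hsplit := occAux_drop_split cs c (m.toNat - k) k m.toNat rfl hkm hmlt
          (fun i h1 h2 => by
            have := hmin i (by exact_mod_cast Int.ofNat_le.mpr h1) (by omega)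
            rw [singleton_prefix_iff, List.head?_drop] at this
            exact this)
          hcm
        rw [hsplit]
        simp [hm0]

lemma positions_eq (cs : List Char) (c : Char) : positions cs [c] = occAux c cs 0 := by
  unfold positions
  have h0 : PySem.Chars.find cs [c] = PySem.Chars.findFrom cs [c] ((0 : Nat) : Int) none := by
    simp
  rw [h0, posGo_spec cs c (cs.length + 1) 0 [] (by omega) (by omega)]
  simp

-- A's inner character loop, in terms of the occurrence index lists
lemma inner_eq (j : Int) (cs : List Char) (n : Int) (p : Option (Int × Int))
    (o : PySem.Set (Int × Int)) :
    (PySem.List.enumerate cs n).foldl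
      (fun st ic =>
        if ic.2 = '#' then (st.1, PySem.Set.add st.2 (j, ic.1))
        else if ic.2 = '^' then (some (j, ic.1), st.2)
        else st) (p, o)
    = ((occAux '^' cs n).foldl (fun _ x => some (j, x)) p,
       (occAux '#' cs n).foldl (fun s i => PySem.Set.add s (j, i)) o) := by
  induction cs generalizing n p o with
  | nil => rfl
  | cons x t ih =>
      rw [PySem.List.enumerate_cons, List.foldl_cons]
      by_cases h1 : x = '#'
      · simp [occAux, h1, ih]
      · by_cases h2 : x = '^' <;> simp [occAux, h1, h2, ih]

lemma foldl_overwrite_pair (l : List Int) (j : Int) (p : Option (Int × Int)) :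
    l.foldl (fun _ x => some (j, x)) p
      = match l.getLast? with | some i => some (j, i) | none => p := by
  induction l generalizing p with
  | nil => rfl
  | cons hd tl ih =>
      rw [List.foldl_cons, ih]
      cases htl : tl.getLast? with
      | some x => simp [List.getLast?_cons, htl]
      | none =>
          have : tl = [] := List.getLast?_eq_none_iff.mp htl
          simp [this]

-- ===== VERDICT (by name: the statement is the Claim_ definition above) =====
theorem parse_spec : Claim_equal_parse := by
  intro lines _ _
  unfold Spec_parse parse parse_alt
  have hstep : ∀ (st : Option (Int × Int) × PySem.Set (Int × Int)) (jl : Int × String),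
      (PySem.List.enumerate jl.2.toList 0).foldl
        (fun st ic =>
          if ic.2 = '#' then (st.1, PySem.Set.add st.2 (jl.1, ic.1))
          else if ic.2 = '^' then (some (jl.1, ic.1), st.2)
          else st) st
      = (let cs := jl.2.toList
         let obs := (positions cs ['#']).foldl (fun s i => PySem.Set.add s (jl.1, i)) st.2
         let carets := positions cs ['^']
         let pos := match carets.getLast? with
           | some i => some (jl.1, i)
           | none => st.1
         (pos, obs)) := by
    intro st jl
    simp only [positions_eq, inner_eq jl.1 jl.2.toList 0 st.1 st.2,
      foldl_overwrite_pair]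
  rw [funext fun st => funext fun jl => hstep st jl]
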